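-- pv_equiv track=rewrite | github.com/ali6406/Basic-Python | sum of all part numbers in the engine schematic.py | sum_adjacent_numbers
-- ===== SOURCE A (Python) =====
-- def is_valid_coordinate(row, col, max_row, max_col):
--     return 0 <= row < max_row and 0 <= col < max_col
--
-- def sum_adjacent_numbers(schematic):
--     symbols = ['*', '#', '+', '$']
--     rows = len(schematic)
--     cols = len(schematic[0])
--     total_sum = 0
--
--     for r in range(rows):
--         for c in range(cols):
--             if schematic[r][c].isdigit():
--                 adjacent = False
--                 for dr, dc in [(0, 1), (0, -1), (1, 0), (-1, 0)]:
--                     new_r, new_c = r + dr, c + dc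
--                     if is_valid_coordinate(new_r, new_c, rows, cols) and schematic[new_r][new_c] in symbols:
--                         adjacent = True
--                         break
--                 if adjacent:
--                     total_sum += int(schematic[r][c])
--
--     return total_sum
-- ===== SOURCE B (Python) =====
-- def sum_adjacent_numbers(schematic):
--     symbols = {'*', '#', '+', '$'}
--     rows = len(schematic)
--     cols = len(schematic[0])
--     digit_cells = set()
--     for r in range(rows):
--         for c in range(cols):
--             if schematic[r][c] in symbols:
--                 for nr, nc in ((r, c + 1), (r, c - 1), (r + 1, c), (r - 1, c)):
--                     if 0 <= nr < rows and 0 <= nc < cols and schematic[nr][nc].isdigit():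
--                         digit_cells.add((nr, nc))
--     return sum(int(schematic[r][c]) for r, c in digit_cells)
-- ===== Notes on version B (the rewrite author's own statement) =====
-- stated objective: alternative
-- what changed: Replaced the digit-centric scan (for every digit cell, search its 4 neighbors for a symbol, with a break flag) by a symbol-centric pass that collects the digit neighbors of every symbol cell into a set of coordinates and sums the digits of that set at the end, deduplicating via the set instead of the break.
import Mathlib
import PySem

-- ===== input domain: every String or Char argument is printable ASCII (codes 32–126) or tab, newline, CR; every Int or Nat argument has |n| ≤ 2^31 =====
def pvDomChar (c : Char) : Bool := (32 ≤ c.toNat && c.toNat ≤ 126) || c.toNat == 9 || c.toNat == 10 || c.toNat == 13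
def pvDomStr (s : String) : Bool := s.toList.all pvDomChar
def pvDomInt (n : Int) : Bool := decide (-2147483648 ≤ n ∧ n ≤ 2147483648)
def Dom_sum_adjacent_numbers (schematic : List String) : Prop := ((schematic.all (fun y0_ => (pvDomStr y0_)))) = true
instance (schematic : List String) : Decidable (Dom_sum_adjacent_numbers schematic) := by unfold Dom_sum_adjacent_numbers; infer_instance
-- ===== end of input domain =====

-- B replaces A's digit-centric neighbor search (break flag) by a symbol-centric pass that
-- collects each symbol's digit neighbors into a coordinate set and sums those digits at the end.

-- ===== PORT A =====
-- schematic[r][c] on the in-range indices the programs use (default only hit outside Pre_)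
def pvCell (g : List String) (r c : Int) : Char :=
  PySem.List.pyGetD (PySem.List.pyGetD g r "").toList c ' '

-- ch.isdigit() for a single ASCII char (Dom restricts to ASCII)
def pvIsDigit (ch : Char) : Bool := decide ('0' ≤ ch) && decide (ch ≤ '9')

-- int(ch) for a single digit char
def pvDigitVal (ch : Char) : Int := (ch.toNat : Int) - 48

def is_valid_coordinate (row col max_row max_col : Int) : Bool :=
  decide (0 ≤ row) && decide (row < max_row) && decide (0 ≤ col) && decide (col < max_col)

def sum_adjacent_numbers (schematic : List String) : Int :=
  let symbols : List Char := ['*', '#', '+', '$']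
  let rows : Int := schematic.length
  let cols : Int := ((PySem.List.pyGetD schematic 0 "").toList.length : Int)
  (PySem.List.pyRange 0 rows 1).foldl (fun total r =>
    (PySem.List.pyRange 0 cols 1).foldl (fun total c =>
      if pvIsDigit (pvCell schematic r c) then
        -- the break-flag loop over the four (dr, dc): 'adjacent' is the any-of
        if [((0:Int),(1:Int)), (0,-1), (1,0), (-1,0)].any (fun d =>
             is_valid_coordinate (r + d.1) (c + d.2) rows cols
               && symbols.contains (pvCell schematic (r + d.1) (c + d.2)))
        then total + pvDigitVal (pvCell schematic r c) else total
      else total) total) 0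

-- ===== PORT B =====
def sum_adjacent_numbers_alt (schematic : List String) : Int :=
  let symbols : List Char := ['*', '#', '+', '$']
  let rows : Int := schematic.length
  let cols : Int := ((PySem.List.pyGetD schematic 0 "").toList.length : Int)
  let cells : PySem.Set (Int × Int) :=
    (PySem.List.pyRange 0 rows 1).foldl (fun s r =>
      (PySem.List.pyRange 0 cols 1).foldl (fun s c =>
        if symbols.contains (pvCell schematic r c) then
          [(r, c + 1), (r, c - 1), (r + 1, c), (r - 1, c)].foldl (fun s p =>
            if (decide (0 ≤ p.1) && decide (p.1 < rows) && decide (0 ≤ p.2) && decide (p.2 < cols))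
                 && pvIsDigit (pvCell schematic p.1 p.2)
            then PySem.Set.add s p else s) s
        else s) s) PySem.Set.empty
  -- sum over the set: order-independent
  cells.foldl (fun t p => t + pvDigitVal (pvCell schematic p.1 p.2)) 0

-- ===== PRECONDITION & SPEC =====
-- A raises IndexError on an empty schematic (it indexes row 0) and whenever some row is shorter than row 0
-- (every row is indexed at all columns c < len(schematic[0])); Pre_ excludes exactly those.
def Pre_sum_adjacent_numbers (schematic : List String) : Prop :=
  schematic ≠ [] ∧
    ∀ s ∈ schematic, (PySem.List.pyGetD schematic 0 "").toList.length ≤ s.toList.length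

instance (schematic : List String) : Decidable (Pre_sum_adjacent_numbers schematic) := by
  unfold Pre_sum_adjacent_numbers; infer_instance

def pvWitness_sum_adjacent_numbers : List String := ["12*", ".3.4", "+9.."]

def Spec_sum_adjacent_numbers (schematic : List String) (out : Int) : Prop := out = sum_adjacent_numbers_alt schematic
instance (schematic : List String) (out : Int) : Decidable (Spec_sum_adjacent_numbers schematic out) := by unfold Spec_sum_adjacent_numbers; infer_instance

-- ===== CLAIM (what is proved, stated in full; the proofs are below) =====
def Claim_equal_sum_adjacent_numbers : Prop := ∀ (schematic : List String), Dom_sum_adjacent_numbers schematic → Pre_sum_adjacent_numbers schematic → Spec_sum_adjacent_numbers schematic (sum_adjacent_numbers schematic)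

-- ===== LEMMAS AND PROOFS =====

-- the A-side per-cell predicate, named for the proofs
def pvPA (g : List String) (rows cols r c : Int) : Bool :=
  pvIsDigit (pvCell g r c) &&
    [((0:Int),(1:Int)), (0,-1), (1,0), (-1,0)].any (fun d =>
      is_valid_coordinate (r + d.1) (c + d.2) rows cols
        && ['*', '#', '+', '$'].contains (pvCell g (r + d.1) (c + d.2)))

-- the B-side neighbor guard, named for the proofs
def pvGB (g : List String) (rows cols : Int) (p : Int × Int) : Bool :=
  (decide (0 ≤ p.1) && decide (p.1 < rows) && decide (0 ≤ p.2) && decide (p.2 < cols))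
    && pvIsDigit (pvCell g p.1 p.2)

-- a conditional-add-with-sum loop shape: 'if p(x) then (if q(x) then t += v(x))'
theorem pvFoldlAddIf2 {α : Type} (l : List α) (p q : α → Bool) (v : α → Int) (a : Int) :
    l.foldl (fun t x => if p x then (if q x then t + v x else t) else t) a
      = a + (l.map (fun x => if p x && q x then v x else 0)).sum := by
  induction l generalizing a with
  | nil => simp
  | cons x xs ih =>
    simp only [List.foldl_cons, List.map_cons, List.sum_cons, ih]
    by_cases hp : p x <;> by_cases hq : q x <;> (simp [hp, hq]; try ring)

-- membership through a fold whose step has a membership characterization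
theorem pvMemFoldlStep {α β : Type} (l : List α) (F : List β → α → List β)
    (Q : α → β → Prop) (h : ∀ s x y, y ∈ F s x ↔ y ∈ s ∨ Q x y) :
    ∀ (s : List β) (y : β), y ∈ l.foldl F s ↔ y ∈ s ∨ ∃ x ∈ l, Q x y := by
  induction l with
  | nil => simp
  | cons x xs ih =>
    intro s y
    rw [List.foldl_cons, ih, h]
    constructor
    · rintro (( hs | hq) | ⟨z, hz, hQ⟩)
      · exact Or.inl hs
      · exact Or.inr ⟨x, by simp, hq⟩
      · exact Or.inr ⟨z, by simp [hz], hQ⟩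
    · rintro (hs | ⟨z, hz, hQ⟩)
      · exact Or.inl (Or.inl hs)
      · rcases List.mem_cons.mp hz with rfl | hz'
        · exact Or.inl (Or.inr hQ)
        · exact Or.inr ⟨z, hz', hQ⟩

-- nodup is preserved through a fold whose step preserves it
theorem pvNodupFoldlStep {α β : Type} (l : List α) (F : List β → α → List β)
    (h : ∀ s x, s.Nodup → (F s x).Nodup) :
    ∀ (s : List β), s.Nodup → (l.foldl F s).Nodup := by
  induction l with
  | nil => intro s hs; simpa using hs
  | cons x xs ih => intro s hs; exact ih _ (h s x hs)

-- Σ if-then-v-else-0 = Σ over the filtered list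
theorem pvSumIte {α : Type} (l : List α) (p : α → Bool) (v : α → Int) :
    (l.map (fun x => if p x then v x else 0)).sum = ((l.filter p).map v).sum := by
  induction l with
  | nil => simp
  | cons x xs ih => by_cases hp : p x <;> simp [hp, ih]


-- Σ over a flatMap = Σ of the row sums
theorem pvSumFlatMap {α : Type} (l : List α) (f : α → List Int) :
    (l.flatMap f).sum = (l.map (fun a => (f a).sum)).sum := by
  induction l with
  | nil => rfl
  | cons x xs ih => simp [List.flatMap_cons, List.sum_append, ih]

def pvRows (g : List String) : Int := (g.length : Int)
def pvCols (g : List String) : Int := ((PySem.List.pyGetD g 0 "").toList.length : Int)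
def pvSymList : List Char := ['*', '#', '+', '$']
def pvNeigh (r c : Int) : List (Int × Int) := [(r, c + 1), (r, c - 1), (r + 1, c), (r - 1, c)]
def pvGrid (g : List String) : List (Int × Int) :=
  (PySem.List.pyRange 0 (pvRows g) 1).product (PySem.List.pyRange 0 (pvCols g) 1)
def pvP (g : List String) (y : Int × Int) : Bool := pvPA g (pvRows g) (pvCols g) y.1 y.2
def pvV (g : List String) (p : Int × Int) : Int := pvDigitVal (pvCell g p.1 p.2)

-- B's coordinate set, as a named list
def pvCellsList (g : List String) : List (Int × Int) :=
  (PySem.List.pyRange 0 (pvRows g) 1).foldl (fun s r =>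
    (PySem.List.pyRange 0 (pvCols g) 1).foldl (fun s c =>
      if pvSymList.contains (pvCell g r c) then
        (pvNeigh r c).foldl (fun s p =>
          if pvGB g (pvRows g) (pvCols g) p then PySem.Set.add s p else s) s
      else s) s) PySem.Set.empty

theorem pvA_eq (g : List String) :
    sum_adjacent_numbers g = (((pvGrid g).filter (pvP g)).map (pvV g)).sum := by
  simp only [sum_adjacent_numbers]
  rw [show (((pvGrid g).filter (pvP g)).map (pvV g)).sum
        = ((pvGrid g).map (fun y => if pvP g y then pvV g y else 0)).sum from (pvSumIte _ _ _).symm]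
  simp only [pvFoldlAddIf2, PySem.List.foldl_add, zero_add, pvGrid, List.product,
    List.map_flatMap, pvSumFlatMap, List.map_map, Function.comp_def, pvP, pvV, pvPA,
    pvRows, pvCols]

theorem pvB_eq (g : List String) :
    sum_adjacent_numbers_alt g = ((pvCellsList g).map (pvV g)).sum := by
  simp only [sum_adjacent_numbers_alt, PySem.List.foldl_add, zero_add]
  rfl

theorem pvCells_mem (g : List String) (y : Int × Int) :
    y ∈ pvCellsList g ↔
      ∃ r, (0 ≤ r ∧ r < pvRows g) ∧ ∃ c, (0 ≤ c ∧ c < pvCols g) ∧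
        pvSymList.contains (pvCell g r c) = true ∧
        ∃ p ∈ pvNeigh r c, pvGB g (pvRows g) (pvCols g) p = true ∧ y = p := by
  have hinner : ∀ (r c : Int) (s : List (Int × Int)) (y : Int × Int),
      y ∈ (pvNeigh r c).foldl (fun s p =>
            if pvGB g (pvRows g) (pvCols g) p then PySem.Set.add s p else s) s
        ↔ y ∈ s ∨ ∃ p ∈ pvNeigh r c, pvGB g (pvRows g) (pvCols g) p = true ∧ y = p := by
    intro r c s y
    refine pvMemFoldlStep _ _ (fun p y => pvGB g (pvRows g) (pvCols g) p = true ∧ y = p) ?_ s y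
    intro s p y
    by_cases h : pvGB g (pvRows g) (pvCols g) p <;> simp [h, PySem.Set.mem_add]
  have hmid : ∀ (r : Int) (s : List (Int × Int)) (y : Int × Int),
      y ∈ (PySem.List.pyRange 0 (pvCols g) 1).foldl (fun s c =>
            if pvSymList.contains (pvCell g r c) then
              (pvNeigh r c).foldl (fun s p =>
                if pvGB g (pvRows g) (pvCols g) p then PySem.Set.add s p else s) s
            else s) s
        ↔ y ∈ s ∨ ∃ c ∈ PySem.List.pyRange 0 (pvCols g) 1,
            pvSymList.contains (pvCell g r c) = true ∧
            ∃ p ∈ pvNeigh r c, pvGB g (pvRows g) (pvCols g) p = true ∧ y = p := by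
    intro r s y
    refine pvMemFoldlStep _ _ (fun c y => pvSymList.contains (pvCell g r c) = true ∧
      ∃ p ∈ pvNeigh r c, pvGB g (pvRows g) (pvCols g) p = true ∧ y = p) ?_ s y
    intro s c y
    by_cases h : pvSymList.contains (pvCell g r c) = true
    · rw [if_pos h, hinner]
      constructor
      · rintro (hs | he)
        · exact Or.inl hs
        · exact Or.inr ⟨h, he⟩
      · rintro (hs | ⟨_, he⟩)
        · exact Or.inl hs
        · exact Or.inr he
    · rw [if_neg h]
      constructor
      · exact fun hs => Or.inl hs
      · rintro (hs | ⟨hc', _⟩)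
        · exact hs
        · exact absurd hc' h
  have houter : ∀ (s : List (Int × Int)) (y : Int × Int),
      y ∈ (PySem.List.pyRange 0 (pvRows g) 1).foldl (fun s r =>
            (PySem.List.pyRange 0 (pvCols g) 1).foldl (fun s c =>
              if pvSymList.contains (pvCell g r c) then
                (pvNeigh r c).foldl (fun s p =>
                  if pvGB g (pvRows g) (pvCols g) p then PySem.Set.add s p else s) s
              else s) s) s
        ↔ y ∈ s ∨ ∃ r ∈ PySem.List.pyRange 0 (pvRows g) 1,
            ∃ c ∈ PySem.List.pyRange 0 (pvCols g) 1,
              pvSymList.contains (pvCell g r c) = true ∧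
              ∃ p ∈ pvNeigh r c, pvGB g (pvRows g) (pvCols g) p = true ∧ y = p := by
    intro s y
    refine pvMemFoldlStep _ _ (fun r y => ∃ c ∈ PySem.List.pyRange 0 (pvCols g) 1,
      pvSymList.contains (pvCell g r c) = true ∧
      ∃ p ∈ pvNeigh r c, pvGB g (pvRows g) (pvCols g) p = true ∧ y = p) ?_ s y
    intro s r y
    exact hmid r s y
  rw [pvCellsList, houter]
  simp [PySem.List.mem_pyRange_one, PySem.Set.empty]

theorem pvCells_nodup (g : List String) : (pvCellsList g).Nodup := by
  rw [pvCellsList]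
  refine pvNodupFoldlStep _ _ ?_ _ List.nodup_nil
  intro s r hs
  refine pvNodupFoldlStep _ _ ?_ _ hs
  intro s c hs
  split
  · refine pvNodupFoldlStep _ _ ?_ _ hs
    intro s p hs
    split
    · exact PySem.Set.nodup_add _ _ hs
    · exact hs
  · exact hs

-- the symbol-centric membership condition equals A's digit-centric predicate (adjacency is symmetric)
theorem pvSymmetry (g : List String) (R C : Int) (y : Int × Int) :
    (∃ r, (0 ≤ r ∧ r < R) ∧ ∃ c, (0 ≤ c ∧ c < C) ∧
        pvSymList.contains (pvCell g r c) = true ∧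
        ∃ p ∈ pvNeigh r c, pvGB g R C p = true ∧ y = p)
      ↔ (0 ≤ y.1 ∧ y.1 < R) ∧ (0 ≤ y.2 ∧ y.2 < C) ∧ pvPA g R C y.1 y.2 = true := by
  obtain ⟨a, b⟩ := y
  simp only [pvNeigh, pvPA, pvGB, is_valid_coordinate, List.mem_cons, List.not_mem_nil,
    or_false, List.any_cons, List.any_nil, Bool.or_eq_true, Bool.and_eq_true,
    decide_eq_true_eq, Bool.or_false, and_assoc]
  constructor
  · rintro ⟨r, hr0, hrR, c, hc0, hcC, hsym, p, hp, hb1, hb2, hb3, hb4, hdig, hy⟩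
    subst hy
    rcases hp with h | h | h | h <;> rw [Prod.mk.injEq] at h <;> obtain ⟨h5, h6⟩ := h <;>
      refine ⟨hb1, hb2, hb3, hb4, hdig, ?_⟩
    · refine Or.inr (Or.inl ⟨by omega, by omega, by omega, by omega, ?_⟩)
      rw [show a + 0 = r by omega, show b + -1 = c by omega]; exact hsym
    · refine Or.inl ⟨by omega, by omega, by omega, by omega, ?_⟩
      rw [show a + 0 = r by omega, show b + 1 = c by omega]; exact hsym
    · refine Or.inr (Or.inr (Or.inr ⟨by omega, by omega, by omega, by omega, ?_⟩))
      rw [show a + -1 = r by omega, show b + 0 = c by omega]; exact hsym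
    · refine Or.inr (Or.inr (Or.inl ⟨by omega, by omega, by omega, by omega, ?_⟩))
      rw [show a + 1 = r by omega, show b + 0 = c by omega]; exact hsym
  · rintro ⟨ha0, haR, hb0, hbC, hdig, hadj⟩
    rcases hadj with ⟨h1, h2, h3, h4, hsym⟩ | ⟨h1, h2, h3, h4, hsym⟩ |
      ⟨h1, h2, h3, h4, hsym⟩ | ⟨h1, h2, h3, h4, hsym⟩
    · exact ⟨a + 0, h1, h2, b + 1, h3, h4, hsym, (a, b),
        Or.inr (Or.inl (by rw [Prod.mk.injEq]; constructor <;> omega)),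
        ha0, haR, hb0, hbC, hdig, rfl⟩
    · exact ⟨a + 0, h1, h2, b + -1, h3, h4, hsym, (a, b),
        Or.inl (by rw [Prod.mk.injEq]; constructor <;> omega),
        ha0, haR, hb0, hbC, hdig, rfl⟩
    · exact ⟨a + 1, h1, h2, b + 0, h3, h4, hsym, (a, b),
        Or.inr (Or.inr (Or.inr (by rw [Prod.mk.injEq]; constructor <;> omega))),
        ha0, haR, hb0, hbC, hdig, rfl⟩
    · exact ⟨a + -1, h1, h2, b + 0, h3, h4, hsym, (a, b),
        Or.inr (Or.inr (Or.inl (by rw [Prod.mk.injEq]; constructor <;> omega))),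
        ha0, haR, hb0, hbC, hdig, rfl⟩

-- ===== VERDICT (by name: the statement is the Claim_ definition above) =====
theorem sum_adjacent_numbers_spec : Claim_equal_sum_adjacent_numbers := by
  intro g _ _
  show sum_adjacent_numbers g = sum_adjacent_numbers_alt g
  rw [pvA_eq, pvB_eq]
  have hperm : ((pvGrid g).filter (pvP g)).Perm (pvCellsList g) := by
    have hgnd : (pvGrid g).Nodup :=
      List.Nodup.product (PySem.List.nodup_pyRange_one 0 (pvRows g))
        (PySem.List.nodup_pyRange_one 0 (pvCols g))
    rw [List.perm_ext_iff_of_nodup (hgnd.filter _) (pvCells_nodup g)]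
    intro y
    rw [pvCells_mem, pvSymmetry]
    obtain ⟨a, b⟩ := y
    simp [List.mem_filter, pvGrid, List.pair_mem_product, PySem.List.mem_pyRange_one, pvP]
    tauto
  exact (hperm.map (pvV g)).sum_eq
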